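-- pv_equiv track=rewrite | github.com/isabert/programming_questions_binarysearch.com | Q603_Paritition_String.py | solve
-- ===== SOURCE A (Python) =====
-- def solve(s):
--     if (s == ''): return []
--     appearance = {}
--     for i in range(len(s)):
--         c = s[i]
--         if (appearance.get(c) != None):
--             appearance[c]['last'] = i
--         else:
--             appearance[c] = {'first': i, 'last': i}
--
--     l = -1
--     u = -1
--     result = []
--
--     # python dict appear by the order the element is first added
--     # otherwise, appearance should be shorted by first
--
--     def in_range(l, u, index):
--         if (l <= index and index <= u):
--             return True
--         return False
--
--     for k in appearance:
--         k_l = appearance[k]['first']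
--         k_u = appearance[k]['last']
--         if (l == -1 and u == -1):
--             l = k_l
--             u = k_u
--             continue
--         if (in_range(l, u, k_l) or in_range(l, u, k_u)):
--             l = min(l, k_l)
--             u = max(u, k_u)
--         else:
--             result.append(u - l + 1)
--             l = k_l
--             u = k_u
--
--     result.append(u - l + 1)
--     return result
-- ===== SOURCE B (Python) =====
-- def solve(s):
--     last = {}
--     for i, c in enumerate(s):
--         last[c] = i
--     result = []
--     start = 0
--     end = 0
--     for i, c in enumerate(s):
--         end = max(end, last[c])
--         if i == end:
--             result.append(i - start + 1)
--             start = i + 1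
--     return result
-- ===== Notes on version B (the rewrite author's own statement) =====
-- stated objective: idiomatic
-- what changed: Replaces the dict of per-character {first,last} interval records and the interval-merging pass over them by the standard one-pass greedy: a last-occurrence index per character, then a single scan that extends the current partition's end and cuts when the position reaches it.
import Mathlib
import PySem

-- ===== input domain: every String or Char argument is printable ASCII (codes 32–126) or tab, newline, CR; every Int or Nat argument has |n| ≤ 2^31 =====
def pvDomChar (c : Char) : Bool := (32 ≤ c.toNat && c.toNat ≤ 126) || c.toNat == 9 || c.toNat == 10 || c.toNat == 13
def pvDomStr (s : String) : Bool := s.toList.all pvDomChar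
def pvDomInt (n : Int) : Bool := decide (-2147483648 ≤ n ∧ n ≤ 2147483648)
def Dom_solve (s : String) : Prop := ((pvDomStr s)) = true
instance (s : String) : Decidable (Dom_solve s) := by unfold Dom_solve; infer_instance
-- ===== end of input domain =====

-- B replaces A's dict of per-character {first,last} interval records and the interval-merge pass
-- over them by the standard one-pass greedy over last-occurrence indices (objective: idiomatic).

-- ===== PORT A =====
-- helper 'in_range' of A
def in_range (l u index : Int) : Bool :=
  if l ≤ index ∧ index ≤ u then true else false

def solve (s : String) : List Int :=
  if s = "" then []
  else
    let cs := s.toList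
    let appearance : PySem.Dict Char (PySem.Dict String Int) :=
      (PySem.List.pyRange 0 (PySem.Str.len s) 1).foldl (fun d i =>
        let c := PySem.List.pyGetD cs i ' '
        if d.get? c ≠ none then
          d.insert c (((d.get? c).getD PySem.Dict.empty).insert "last" i)
        else
          d.insert c (PySem.Dict.ofList [("first", i), ("last", i)])) PySem.Dict.empty
    let st := appearance.keys.foldl (fun (st : Int × Int × List Int) k =>
      let l := st.1
      let u := st.2.1
      let result := st.2.2
      let k_l := ((appearance.get? k).getD PySem.Dict.empty).getD "first" 0
      let k_u := ((appearance.get? k).getD PySem.Dict.empty).getD "last" 0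
      if l = -1 ∧ u = -1 then (k_l, k_u, result)
      else if in_range l u k_l || in_range l u k_u then (min l k_l, max u k_u, result)
      else (k_l, k_u, result ++ [u - l + 1])) (-1, -1, [])
    st.2.2 ++ [st.2.1 - st.1 + 1]

-- ===== PORT B =====
def solve_alt (s : String) : List Int :=
  let cs := s.toList
  let last : PySem.Dict Char Int :=
    (PySem.List.enumerate cs 0).foldl (fun d p => d.insert p.2 p.1) PySem.Dict.empty
  let st := (PySem.List.enumerate cs 0).foldl (fun (st : List Int × Int × Int) p =>
    let e := max st.2.2 (last.getD p.2 0)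
    if p.1 = e then (st.1 ++ [p.1 - st.2.1 + 1], p.1 + 1, e) else (st.1, st.2.1, e))
    ([], 0, 0)
  st.1

-- ===== PRECONDITION & SPEC =====
def Spec_solve (s : String) (out : List Int) : Prop := out = solve_alt s
instance (s : String) (out : List Int) : Decidable (Spec_solve s out) := by unfold Spec_solve; infer_instance

-- ===== CLAIM (what is proved, stated in full; the proofs are below) =====
def Claim_equal_solve : Prop := ∀ (s : String), Dom_solve s → Spec_solve s (solve s)

-- ===== LEMMAS AND PROOFS =====

def lastIdx (cs : List Char) (c : Char) : Nat :=
  Nat.findGreatest (fun j => cs[j]? = some c) cs.length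

def qmax (cs : List Char) : Nat → Nat
  | 0 => 0
  | m+1 => max (qmax cs m) (lastIdx cs (cs.getD m ' '))

def mkSizes (prev : Int) : List Nat → List Int
  | [] => []
  | c :: r => ((c : Int) - prev) :: mkSizes (c : Int) r

def cutsFrom (cs : List Char) (a : Nat) : List Nat :=
  (List.range' a (cs.length - a)).filter (fun i => qmax cs (i+1) = i)

lemma lastIdx_ge (cs : List Char) (j : Nat) (hj : j < cs.length) : j ≤ lastIdx cs cs[j] :=
  Nat.le_findGreatest (Nat.le_of_lt hj) (by simp [List.getElem?_eq_some_iff])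

lemma lastIdx_spec (cs : List Char) (c : Char) (hc : c ∈ cs) :
    ∃ h : lastIdx cs c < cs.length, cs[lastIdx cs c] = c := by
  obtain ⟨j, hj, rfl⟩ := List.mem_iff_getElem.mp hc
  have := Nat.findGreatest_spec (P := fun j' => cs[j']? = some cs[j]) (Nat.le_of_lt hj)
    (by simp)
  simp only [] at this
  rw [List.getElem?_eq_some_iff] at this
  exact ⟨this.1, this.2⟩

lemma lastIdx_lt (cs : List Char) (c : Char) (hc : c ∈ cs) : lastIdx cs c < cs.length :=
  (lastIdx_spec cs c hc).1

lemma findGreatest_congr (P Q : Nat → Prop) [DecidablePred P] [DecidablePred Q] (b : Nat)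
    (h : ∀ j ≤ b, (P j ↔ Q j)) : Nat.findGreatest P b = Nat.findGreatest Q b := by
  induction b with
  | zero => rfl
  | succ m ih =>
      rw [Nat.findGreatest_succ, Nat.findGreatest_succ]
      rw [ih (fun j hj => h j (by omega))]
      by_cases hq : Q (m+1)
      · rw [if_pos ((h (m+1) le_rfl).mpr hq), if_pos hq]
      · rw [if_neg (fun hp => hq ((h (m+1) le_rfl).mp hp)), if_neg hq]

lemma lastIdx_append_self (cs : List Char) (x : Char) :
    lastIdx (cs ++ [x]) x = cs.length := by
  have h2 : cs.length ≤ lastIdx (cs ++ [x]) x :=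
    Nat.le_findGreatest (by simp) (by simp)
  have h3 := lastIdx_lt (cs ++ [x]) x (by simp)
  simp at h3; omega

lemma lastIdx_append_ne (cs : List Char) (x c : Char) (hne : c ≠ x) :
    lastIdx (cs ++ [x]) c = lastIdx cs c := by
  unfold lastIdx
  have hlen : (cs ++ [x]).length = cs.length + 1 := by simp
  rw [hlen, Nat.findGreatest_succ, if_neg]
  · exact findGreatest_congr _ _ _ (fun j hj => by
      constructor
      · intro h
        rcases Nat.lt_or_ge j cs.length with hlt | hge
        · rwa [List.getElem?_append_left hlt] at h
        · exfalso
          have hj' : j = cs.length := by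
            rcases Nat.lt_or_ge j (cs.length + 1) with h1 | h1
            · omega
            · rw [List.getElem?_eq_none_iff.mpr (by simpa using h1)] at h; simp at h
          subst hj'
          rw [List.getElem?_append_right le_rfl] at h
          simp at h
          exact hne h.symm
      · intro h
        have hlt : j < cs.length := (List.getElem?_eq_some_iff.mp h).1
        rwa [List.getElem?_append_left hlt])
  · rw [List.getElem?_append_right (by omega)]
    simpa using fun h => hne h.symm

lemma idxOf_getElem_le (cs : List Char) (i : Nat) (h : i < cs.length) : cs.idxOf cs[i] ≤ i := by
  by_contra hlt
  have := List.not_of_lt_findIdx (p := (· == cs[i])) (xs := cs) (i := i) (by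
    simpa [List.idxOf] using hlt)
  simp at this; exact this rfl

lemma qmax_mono (cs : List Char) {m m' : Nat} (h : m ≤ m') : qmax cs m ≤ qmax cs m' := by
  induction m' with
  | zero => simp_all [qmax]
  | succ k ih =>
      rcases Nat.lt_or_ge m (k+1) with h1 | h1
      · exact le_trans (ih (by omega)) (by simp [qmax])
      · have : m = k + 1 := by omega
        subst this; rfl

lemma qmax_lt (cs : List Char) (hn : cs ≠ []) (m : Nat) (hm : m ≤ cs.length) :
    qmax cs m < cs.length := by
  induction m with
  | zero => simpa [qmax] using List.length_pos_iff.mpr hn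
  | succ k ih =>
      rw [qmax]
      have hk : k < cs.length := by omega
      have : cs.getD k ' ' = cs[k] := List.getD_eq_getElem cs ' ' hk
      rw [this]
      exact max_lt (ih (by omega)) (lastIdx_lt cs cs[k] (List.getElem_mem hk))

lemma le_qmax_succ (cs : List Char) (m : Nat) (hm : m < cs.length) : m ≤ qmax cs (m+1) := by
  rw [qmax, List.getD_eq_getElem cs ' ' hm]
  exact le_trans (lastIdx_ge cs m hm) (le_max_right _ _)

lemma lastIdx_le_qmax (cs : List Char) (c : Char) (hc : c ∈ cs) :
    lastIdx cs c ≤ qmax cs (cs.idxOf c + 1) := by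
  have hF : cs.idxOf c < cs.length := List.idxOf_lt_length_iff.mpr hc
  rw [qmax, List.getD_eq_getElem cs ' ' hF, List.getElem_idxOf hF]
  exact le_max_right _ _

-- q is constant on a window (a, b] in which every character's first occurrence is ≤ a
lemma qmax_const (cs : List Char) (a b : Nat) (hb : b ≤ cs.length)
    (hwin : ∀ i (h : i < cs.length), a < i → i < b → cs.idxOf cs[i] ≤ a) :
    ∀ m, a < m → m ≤ b → qmax cs m = qmax cs (a+1) := by
  intro m ham hmb
  induction m with
  | zero => omega
  | succ k ih =>
      rcases Nat.lt_or_ge a k with hak | hak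
      · -- k > a: q(k+1) = max (q k) (lastIdx cs[k]) = q k = q (a+1)
        have hk : k < cs.length := by omega
        rw [qmax, List.getD_eq_getElem cs ' ' hk]
        have hF := hwin k hk hak (by omega)
        have h1 : lastIdx cs cs[k] ≤ qmax cs (cs.idxOf cs[k] + 1) :=
          lastIdx_le_qmax cs cs[k] (List.getElem_mem hk)
        have h2 : qmax cs (cs.idxOf cs[k] + 1) ≤ qmax cs (a+1) := qmax_mono cs (by omega)
        have h3 : qmax cs (a+1) ≤ qmax cs k := qmax_mono cs (by omega)
        have := ih (by omega) (by omega)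
        omega
      · have : k = a := by omega
        subst this; rfl

-- B's last-occurrence dict computes lastIdx
lemma lastDict_getD (cs : List Char) (c : Char) (hc : c ∈ cs) :
    ((PySem.List.enumerate cs 0).foldl (fun d p => d.insert p.2 p.1) PySem.Dict.empty).getD c 0
      = (lastIdx cs c : Int) := by
  induction cs using List.reverseRecOn with
  | nil => simp at hc
  | append_singleton cs x ih =>
      rw [PySem.List.enumerate_append]
      simp only [PySem.List.enumerate_cons, PySem.List.enumerate_nil, List.foldl_append, List.foldl_cons, List.foldl_nil]
      by_cases hcx : c = x
      · subst hcx
        rw [PySem.Dict.getD_insert_self, lastIdx_append_self]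
        norm_num
      · rw [PySem.Dict.getD_insert_of_ne (hne := hcx), lastIdx_append_ne cs x c hcx]
        have : c ∈ cs := by
          rcases List.mem_append.mp hc with h | h
          · exact h
          · simp at h; exact absurd h hcx
        exact ih this

-- abstract B step (dict lookup replaced by lastIdx)
def stepB (cs : List Char) (st : List Int × Int × Int) (p : Int × Char) : List Int × Int × Int :=
  let e := max st.2.2 ((lastIdx cs p.2 : Int))
  if p.1 = e then (st.1 ++ [p.1 - st.2.1 + 1], p.1 + 1, e) else (st.1, st.2.1, e)

lemma Bfold (cs : List Char) : ∀ fuel k, cs.length - k = fuel → k ≤ cs.length →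
    ∀ (res : List Int) (prev : Int),
    ((PySem.List.enumerate (cs.drop k) (k : Int)).foldl (stepB cs) (res, prev + 1, (qmax cs k : Int))).1
      = res ++ mkSizes prev (cutsFrom cs k) := by
  intro fuel
  induction fuel with
  | zero =>
      intro k hf hk res prev
      have hkn : k = cs.length := by omega
      subst hkn
      simp [PySem.List.enumerate_nil, cutsFrom, mkSizes]
  | succ m ih =>
      intro k hf hk res prev
      have hkn : k < cs.length := by omega
      rw [List.drop_eq_getElem_cons hkn, PySem.List.enumerate_cons]
      simp only [List.foldl_cons]
      have hq : max ((qmax cs k : Nat) : Int) ((lastIdx cs cs[k] : Nat) : Int) = ((qmax cs (k+1) : Nat) : Int) := by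
        rw [qmax, List.getD_eq_getElem cs ' ' hkn]
        push_cast
        rfl
      have hcuts : cutsFrom cs k =
          (if qmax cs (k+1) = k then [k] else []) ++ cutsFrom cs (k+1) := by
        unfold cutsFrom
        have : cs.length - k = (cs.length - (k+1)) + 1 := by omega
        rw [this, List.range'_succ, List.filter_cons]
        by_cases hc : qmax cs (k+1) = k <;> simp [hc]
      rw [stepB]
      simp only [hq]
      by_cases hcut : (k : Int) = ((qmax cs (k+1) : Nat) : Int)
      · have hcut' : qmax cs (k+1) = k := by exact_mod_cast hcut.symm
        rw [if_pos hcut]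
        have : ((k : Int) + 1) = ((k : Int)) + 1 := rfl
        have hrec := ih (k+1) (by omega) (by omega) (res ++ [(k : Int) - prev]) (k : Int)
        push_cast at hrec ⊢
        have harg : (k:Int) - (prev + 1) + 1 = (k:Int) - prev := by ring
        rw [harg]
        rw [hrec, hcuts, hcut']
        simp [mkSizes]
      · rw [if_neg hcut]
        have hrec := ih (k+1) (by omega) (by omega) res prev
        push_cast at hrec ⊢
        rw [hrec, hcuts]
        have : ¬ qmax cs (k+1) = k := fun h => hcut (by exact_mod_cast h.symm)
        simp [this]

lemma Bmain (cs : List Char) (ld : PySem.Dict Char Int)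
    (hld : ∀ c ∈ cs, ld.getD c 0 = (lastIdx cs c : Int)) :
    ((PySem.List.enumerate cs 0).foldl (fun (st : List Int × Int × Int) p =>
      let e := max st.2.2 (ld.getD p.2 0)
      if p.1 = e then (st.1 ++ [p.1 - st.2.1 + 1], p.1 + 1, e) else (st.1, st.2.1, e))
      ([], 0, 0)).1 = mkSizes (-1) (cutsFrom cs 0) := by
  rw [PySem.List.foldl_congr_mem
    (f := fun (st : List Int × Int × Int) (p : Int × Char) =>
      let e := max st.2.2 (ld.getD p.2 0)
      if p.1 = e then (st.1 ++ [p.1 - st.2.1 + 1], p.1 + 1, e) else (st.1, st.2.1, e))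
    (g := stepB cs) (init := (([] : List Int), (0:Int), (0:Int))) (l := PySem.List.enumerate cs 0) (by
    intro acc p hp
    rw [PySem.List.mem_enumerate_iff] at hp
    obtain ⟨j, hj, rfl⟩ := hp
    show (let e := max acc.2.2 (ld.getD _ 0); if _ = e then _ else _) = _
    rw [stepB]
    dsimp only
    rw [hld _ (List.getElem_mem hj)])]
  have h := Bfold cs cs.length 0 (by omega) (by omega) [] (-1)
  simp only [List.drop_zero, Nat.cast_zero] at h
  rw [show ((-1 : Int) + 1) = 0 from rfl] at h
  rw [show (qmax cs 0 : Int) = 0 from rfl] at h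
  rw [h]
  simp

lemma solve_alt_eq (s : String) : solve_alt s = mkSizes (-1) (cutsFrom s.toList 0) :=
  Bmain s.toList _ (fun c hc => lastDict_getD s.toList c hc)

lemma idxOf_append_self_of_not_mem (cs : List Char) (x : Char) (h : x ∉ cs) :
    (cs ++ [x]).idxOf x = cs.length := by
  simp [List.idxOf, List.findIdx_append]
  intro hy
  exact absurd hy h

-- the distinct characters in first-occurrence order have strictly increasing first indices
lemma pairwise_idxOf (cs : List Char) :
    (PySem.Set.ofList cs).Pairwise (fun a b => cs.idxOf a < cs.idxOf b) := by
  induction cs using List.reverseRecOn with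
  | nil => simp [PySem.Set.ofList]
  | append_singleton cs x ih =>
      rw [PySem.Set.ofList_append_singleton]
      by_cases hx : x ∈ cs
      · rw [PySem.Set.add_of_mem (by rwa [PySem.Set.mem_ofList])]
        refine ih.imp_of_mem ?_
        intro a b ha hb hab
        have ha' : a ∈ cs := (PySem.Set.mem_ofList _ _).mp ha
        have hb' : b ∈ cs := (PySem.Set.mem_ofList _ _).mp hb
        rwa [List.idxOf_append_of_mem ha', List.idxOf_append_of_mem hb']
      · rw [PySem.Set.add_of_not_mem (by rwa [PySem.Set.mem_ofList])]
        rw [List.pairwise_append]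
        refine ⟨ih.imp_of_mem ?_, by simp, ?_⟩
        · intro a b ha hb hab
          have ha' : a ∈ cs := (PySem.Set.mem_ofList _ _).mp ha
          have hb' : b ∈ cs := (PySem.Set.mem_ofList _ _).mp hb
          rwa [List.idxOf_append_of_mem ha', List.idxOf_append_of_mem hb']
        · intro a ha b hb
          have ha' : a ∈ cs := (PySem.Set.mem_ofList _ _).mp ha
          simp at hb; subst hb
          rw [List.idxOf_append_of_mem ha', idxOf_append_self_of_not_mem cs b hx]
          exact List.idxOf_lt_length_iff.mpr ha'

-- A's dict-building loop body and dict (proof-side names)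
def appStep (ds : List Char) (d : PySem.Dict Char (PySem.Dict String Int)) (i : Int) :
    PySem.Dict Char (PySem.Dict String Int) :=
  let c := PySem.List.pyGetD ds i ' '
  if d.get? c ≠ none then
    d.insert c (((d.get? c).getD PySem.Dict.empty).insert "last" i)
  else
    d.insert c (PySem.Dict.ofList [("first", i), ("last", i)])

def appD (cs : List Char) : PySem.Dict Char (PySem.Dict String Int) :=
  (PySem.List.pyRange 0 (cs.length : Int) 1).foldl (appStep cs) PySem.Dict.empty

lemma appD_append (cs : List Char) (x : Char) :
    appD (cs ++ [x]) = appStep (cs ++ [x]) (appD cs) (cs.length : Int) := by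
  unfold appD
  have hlen : ((cs ++ [x]).length : Int) = (cs.length : Int) + 1 := by
    push_cast [List.length_append]; simp
  rw [hlen, PySem.List.pyRange_one_succ_right (by positivity), List.foldl_append,
    List.foldl_cons, List.foldl_nil]
  congr 1
  apply PySem.List.foldl_congr_mem
  intro acc i hi
  rw [PySem.List.mem_pyRange_one] at hi
  unfold appStep
  have hg : PySem.List.pyGetD (cs ++ [x]) i ' ' = PySem.List.pyGetD cs i ' ' := by
    rw [PySem.List.pyGetD_eq_getElem _ _ hi.1 (by simp; omega),
        PySem.List.pyGetD_eq_getElem _ _ hi.1 (by exact_mod_cast hi.2)]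
    exact List.getElem_append_left (by
      have h2 := hi.2
      have : (i.toNat : Int) = i := Int.toNat_of_nonneg hi.1
      omega)
  rw [hg]

lemma app_char (cs : List Char) :
    (appD cs).keys = PySem.Set.ofList cs ∧
    ∀ c ∈ cs, (((appD cs).get? c).getD PySem.Dict.empty).getD "first" 0 = (cs.idxOf c : Int) ∧
      (((appD cs).get? c).getD PySem.Dict.empty).getD "last" 0 = (lastIdx cs c : Int) := by
  induction cs using List.reverseRecOn with
  | nil => exact ⟨rfl, by simp⟩
  | append_singleton cs x ih =>
      obtain ⟨ihk, ihv⟩ := ih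
      rw [appD_append]
      unfold appStep
      have hgx : PySem.List.pyGetD (cs ++ [x]) (cs.length : Int) ' ' = x := by
        rw [PySem.List.pyGetD_eq_getElem _ _ (by positivity) (by simp)]
        simp
      rw [hgx]
      dsimp only
      have hmemkeys : ∀ c, ((appD cs).get? c ≠ none) ↔ c ∈ cs := by
        intro c
        rw [ne_eq, PySem.Dict.get?_eq_none_iff_not_mem_keys, ihk, not_not,
          PySem.Set.mem_ofList]
      by_cases hx : x ∈ cs
      · rw [if_pos ((hmemkeys x).mpr hx)]
        constructor
        · rw [PySem.Dict.keys_insert_of_contains _ _ (by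
            rw [PySem.Dict.contains_iff_mem_keys, ihk, PySem.Set.mem_ofList]; exact hx)]
          rw [ihk, PySem.Set.ofList_append_singleton,
            PySem.Set.add_of_mem (by rwa [PySem.Set.mem_ofList])]
        · intro c hc
          by_cases hcx : c = x
          · subst hcx
            rw [PySem.Dict.get?_insert_self]
            simp only [Option.getD_some]
            constructor
            · rw [PySem.Dict.getD_insert_of_ne (hne := by decide),
                List.idxOf_append_of_mem hx]
              exact (ihv c hx).1
            · rw [PySem.Dict.getD_insert_self, lastIdx_append_self]
          · rw [PySem.Dict.get?_insert_of_ne (hne := hcx)]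
            have hcs : c ∈ cs := by
              rcases List.mem_append.mp hc with h | h
              · exact h
              · simp at h; exact absurd h hcx
            rw [List.idxOf_append_of_mem hcs, lastIdx_append_ne cs x c hcx]
            exact ihv c hcs
      · rw [if_neg (by rw [hmemkeys]; exact hx)]
        constructor
        · rw [PySem.Dict.keys_insert_of_not_contains _ _ (by
            rw [← Bool.not_eq_true, PySem.Dict.contains_iff_mem_keys, ihk, PySem.Set.mem_ofList]
            exact hx)]
          rw [ihk, PySem.Set.ofList_append_singleton,
            PySem.Set.add_of_not_mem (by rwa [PySem.Set.mem_ofList])]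
        · intro c hc
          by_cases hcx : c = x
          · subst hcx
            rw [PySem.Dict.get?_insert_self]
            simp only [Option.getD_some]
            refine ⟨?_, ?_⟩
            · rw [idxOf_append_self_of_not_mem cs c hx]
              simp only [PySem.Dict.ofList, PySem.Dict.update, List.foldl_cons, List.foldl_nil]
              rw [PySem.Dict.getD_insert_of_ne (hne := by decide), PySem.Dict.getD_insert_self]
            · rw [lastIdx_append_self]
              simp only [PySem.Dict.ofList, PySem.Dict.update, List.foldl_cons, List.foldl_nil]
              rw [PySem.Dict.getD_insert_self]
          · rw [PySem.Dict.get?_insert_of_ne (hne := hcx)]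
            have hcs : c ∈ cs := by
              rcases List.mem_append.mp hc with h | h
              · exact h
              · simp at h; exact absurd h hcx
            rw [List.idxOf_append_of_mem hcs, lastIdx_append_ne cs x c hcx]
            exact ihv c hcs

-- abstract A step (dict lookups replaced by idxOf / lastIdx)
def stepA (cs : List Char) (st : Int × Int × List Int) (k : Char) : Int × Int × List Int :=
  let k_l : Int := (cs.idxOf k : Nat)
  let k_u : Int := (lastIdx cs k : Nat)
  if st.1 = -1 ∧ st.2.1 = -1 then (k_l, k_u, st.2.2)
  else if in_range st.1 st.2.1 k_l || in_range st.1 st.2.1 k_u then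
    (min st.1 k_l, max st.2.1 k_u, st.2.2)
  else (k_l, k_u, st.2.2 ++ [st.2.1 - st.1 + 1])

-- boundary: first index of the next unprocessed character (length when none remain)
def fb (cs rs : List Char) : Nat := match rs with | [] => cs.length | d :: _ => cs.idxOf d

lemma filter_range'_singleton (a len t : Nat) (P : Nat → Bool)
    (hta : a ≤ t) (ht : t < a + len) (hP : P t = true)
    (huniq : ∀ i, a ≤ i → i < a + len → P i = true → i = t) :
    (List.range' a len).filter P = [t] := by
  have hsplit : List.range' a len = List.range' a (t - a) ++ t :: List.range' (t+1) (len - (t - a) - 1) := by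
    have h1 : List.range' a (t - a) ++ List.range' (a + 1 * (t - a)) (len - (t - a)) = List.range' a len := by
      rw [List.range'_append]
      congr 1
      omega
    have h2 : a + 1 * (t - a) = t := by omega
    have h3 : len - (t - a) = (len - (t - a) - 1) + 1 := by omega
    rw [h2, h3, List.range'_succ] at h1
    exact h1.symm
  rw [hsplit, List.filter_append, List.filter_cons_of_pos hP]
  have hnil1 : (List.range' a (t - a)).filter P = [] := by
    rw [List.filter_eq_nil_iff]
    intro i hi
    rw [List.mem_range'_1] at hi
    intro hPi
    have := huniq i hi.1 (by omega) hPi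
    omega
  have hnil2 : (List.range' (t+1) (len - (t - a) - 1)).filter P = [] := by
    rw [List.filter_eq_nil_iff]
    intro i hi
    rw [List.mem_range'_1] at hi
    intro hPi
    have := huniq i (by omega) (by omega) hPi
    omega
  rw [hnil1, hnil2]
  rfl

lemma append_mkSizes_cons (res : List Int) (p : Int) (c : Nat) (r : List Nat) :
    res ++ mkSizes p (c :: r) = (res ++ [(c : Int) - p]) ++ mkSizes (c : Int) r := by
  simp [mkSizes]

lemma Afold (cs : List Char) (hcs : cs ≠ []) :
    ∀ (rs : List Char), rs.Pairwise (fun a b => cs.idxOf a < cs.idxOf b) →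
    (∀ c ∈ rs, c ∈ cs) →
    (∀ i (h : i < cs.length), fb cs rs ≤ cs.idxOf cs[i] → cs[i] ∈ rs) →
    ∀ (lv : Nat) (res : List Int), lv ≤ fb cs rs → lv ≤ qmax cs (fb cs rs) →
    (∀ i, lv ≤ i → i < fb cs rs → qmax cs (i+1) = i → i = qmax cs (fb cs rs)) →
    ((rs.foldl (stepA cs) ((lv : Int), (qmax cs (fb cs rs) : Int), res)).2.2
      ++ [(rs.foldl (stepA cs) ((lv : Int), (qmax cs (fb cs rs) : Int), res)).2.1
          - (rs.foldl (stepA cs) ((lv : Int), (qmax cs (fb cs rs) : Int), res)).1 + 1])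
      = res ++ mkSizes ((lv : Int) - 1) (cutsFrom cs lv) := by
  intro rs
  induction rs with
  | nil =>
      intro _ _ _ lv res hlvf hlvq he
      simp only [List.foldl_nil, fb] at *
      have hn : 0 < cs.length := List.length_pos_iff.mpr hcs
      have hq1 : cs.length - 1 ≤ qmax cs cs.length := by
        have := le_qmax_succ cs (cs.length - 1) (by omega)
        have h2 : cs.length - 1 + 1 = cs.length := by omega
        rwa [h2] at this
      have hq2 : qmax cs cs.length < cs.length := qmax_lt cs hcs cs.length le_rfl
      have hqn : qmax cs cs.length = cs.length - 1 := by omega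
      have hcut : cutsFrom cs lv = [cs.length - 1] := by
        unfold cutsFrom
        apply filter_range'_singleton
        · omega
        · omega
        · simp only [decide_eq_true_eq]
          have h2 : cs.length - 1 + 1 = cs.length := by omega
          rw [h2, hqn]
        · intro i hi1 hi2 hPi
          simp only [decide_eq_true_eq] at hPi
          have := he i hi1 (by omega) hPi
          omega
      rw [hcut]
      have hv : ((qmax cs cs.length : Nat) : Int) - (lv : Int) + 1 = ((cs.length - 1 : Nat) : Int) - ((lv : Int) - 1) := by
        rw [hqn]
        push_cast [Nat.cast_sub (by omega : 1 ≤ cs.length)]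
        ring
      simp [mkSizes, hv]
  | cons d rs' ih =>
      intro hpw hmem h3 lv res hlvf hlvq he
      have hd : d ∈ cs := hmem d List.mem_cons_self
      have hf'n : cs.idxOf d < cs.length := List.idxOf_lt_length_iff.mpr hd
      have hcsd : cs[cs.idxOf d] = d := List.getElem_idxOf hf'n
      have hfL : cs.idxOf d ≤ lastIdx cs d := by
        have := lastIdx_ge cs (cs.idxOf d) hf'n
        rwa [hcsd] at this
      have hLn : lastIdx cs d < cs.length := lastIdx_lt cs d hd
      have hmin : ∀ c ∈ rs', fb cs rs' ≤ cs.idxOf c := by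
        cases rs' with
        | nil => intro c hc; simp at hc
        | cons e t =>
            intro c hc
            rcases List.mem_cons.mp hc with rfl | hct
            · exact le_rfl
            · exact le_of_lt (List.rel_of_pairwise_cons (List.pairwise_cons.mp hpw).2 hct)
      have hff : fb cs (d :: rs') < fb cs rs' := by
        cases rs' with
        | nil => exact hf'n
        | cons e t => exact List.rel_of_pairwise_cons hpw List.mem_cons_self
      have hf''n : fb cs rs' ≤ cs.length := by
        cases rs' with
        | nil => exact le_rfl
        | cons e t =>
            exact le_of_lt (List.idxOf_lt_length_iff.mpr (hmem e (by simp)))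
      have hW : ∀ i (h : i < cs.length), cs.idxOf d ≤ i → i < fb cs rs' → cs.idxOf cs[i] ≤ cs.idxOf d := by
        intro i h hi1 hi2
        by_cases hcase : cs.idxOf d ≤ cs.idxOf cs[i]
        · have hin : cs[i] ∈ d :: rs' := h3 i h hcase
          rcases List.mem_cons.mp hin with heq | hin'
          · rw [heq]
          · exfalso
            have h1 := hmin cs[i] hin'
            have h2 := idxOf_getElem_le cs i h
            omega
        · omega
      have hqstep : ∀ m, cs.idxOf d < m → m ≤ fb cs rs' →
          qmax cs m = max (qmax cs (cs.idxOf d)) (lastIdx cs d) := by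
        intro m hm1 hm2
        have h1 := qmax_const cs (cs.idxOf d) (fb cs rs') hf''n
          (fun i h hi1 hi2 => hW i h (le_of_lt hi1) hi2) m hm1 hm2
        rw [h1, qmax, List.getD_eq_getElem cs ' ' hf'n, hcsd]
      rw [List.foldl_cons]
      have hfb : fb cs (d :: rs') = cs.idxOf d := rfl
      rw [hfb] at hlvf hlvq he ⊢
      unfold stepA
      dsimp only
      rw [if_neg (by
        intro hcon
        have h1 : (0:Int) ≤ (lv : Int) := Int.natCast_nonneg lv
        omega)]
      by_cases hmerge : cs.idxOf d ≤ qmax cs (cs.idxOf d)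
      · -- merge: the new interval overlaps the current one
        rw [if_pos (by
          simp only [in_range, Bool.or_eq_true]
          left
          rw [if_pos ⟨by exact_mod_cast hlvf, by exact_mod_cast hmerge⟩])]
        have hmineq : min ((lv:Nat) : Int) ((cs.idxOf d : Nat) : Int) = ((lv:Nat) : Int) := by
          apply min_eq_left; exact_mod_cast hlvf
        have hmaxeq : max ((qmax cs (cs.idxOf d) : Nat) : Int) ((lastIdx cs d : Nat) : Int)
            = ((qmax cs (fb cs rs') : Nat) : Int) := by
          rw [hqstep (fb cs rs') hff le_rfl]
          push_cast
          rfl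
        rw [hmineq, hmaxeq]
        apply ih (List.pairwise_cons.mp hpw).2 (fun c hc => hmem c (List.mem_cons_of_mem d hc))
        · intro i h hge
          have hin : cs[i] ∈ d :: rs' := h3 i h (by omega)
          rcases List.mem_cons.mp hin with heq | hin'
          · exfalso
            have : cs.idxOf cs[i] = cs.idxOf d := by rw [heq]
            omega
          · exact hin'
        · omega
        · have h1 : qmax cs (cs.idxOf d) ≤ qmax cs (fb cs rs') := qmax_mono cs (by omega)
          omega
        · intro i hi1 hi2 hcut
          rcases Nat.lt_or_ge i (cs.idxOf d) with hlt | hge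
          · exfalso
            have := he i hi1 hlt hcut
            omega
          · have h1 := hqstep (i+1) (by omega) (by omega)
            have h2 := hqstep (fb cs rs') hff le_rfl
            omega
      · -- emit: the current interval is closed here
        push_neg at hmerge
        rw [if_neg (by
          simp only [in_range, Bool.or_eq_true, not_or]
          constructor
          · rw [if_neg (by
              intro hcon
              have := hcon.2
              have : cs.idxOf d ≤ qmax cs (cs.idxOf d) := by exact_mod_cast this
              omega)]
            simp
          · rw [if_neg (by
              intro hcon
              have := hcon.2
              have : lastIdx cs d ≤ qmax cs (cs.idxOf d) := by exact_mod_cast this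
              omega)]
            simp)]
        have hf1 : 1 ≤ cs.idxOf d := by
          by_contra hcon
          have h0 : cs.idxOf d = 0 := by omega
          rw [h0] at hmerge
          simp [qmax] at hmerge
        have hqf : qmax cs (cs.idxOf d) = cs.idxOf d - 1 := by
          have h1 := le_qmax_succ cs (cs.idxOf d - 1) (by omega)
          have h2 : cs.idxOf d - 1 + 1 = cs.idxOf d := by omega
          rw [h2] at h1
          omega
        have hLq : lastIdx cs d = qmax cs (fb cs rs') := by
          have h1 := hqstep (fb cs rs') hff le_rfl
          omega
        have hcutdec : cutsFrom cs lv = (cs.idxOf d - 1) :: cutsFrom cs (cs.idxOf d) := by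
          unfold cutsFrom
          have hsplit : List.range' lv (cs.length - lv)
              = List.range' lv (cs.idxOf d - lv) ++ List.range' (cs.idxOf d) (cs.length - cs.idxOf d) := by
            have h1 : List.range' lv (cs.idxOf d - lv) ++ List.range' (lv + 1 * (cs.idxOf d - lv)) (cs.length - cs.idxOf d)
                = List.range' lv ((cs.idxOf d - lv) + (cs.length - cs.idxOf d)) := List.range'_append
            have h2 : lv + 1 * (cs.idxOf d - lv) = cs.idxOf d := by omega
            have h3 : (cs.idxOf d - lv) + (cs.length - cs.idxOf d) = cs.length - lv := by omega
            rw [h2, h3] at h1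
            exact h1.symm
          rw [hsplit, List.filter_append]
          have hfirst : (List.range' lv (cs.idxOf d - lv)).filter (fun i => decide (qmax cs (i+1) = i))
              = [cs.idxOf d - 1] := by
            apply filter_range'_singleton
            · omega
            · omega
            · simp only [decide_eq_true_eq]
              have h2 : cs.idxOf d - 1 + 1 = cs.idxOf d := by omega
              rw [h2, hqf]
            · intro i hi1 hi2 hPi
              simp only [decide_eq_true_eq] at hPi
              have := he i hi1 (by omega) hPi
              omega
          rw [hfirst]
          rfl
        have hc1 : ((cs.idxOf d - 1 : Nat) : Int) = ((cs.idxOf d : Nat) : Int) - 1 := by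
          push_cast [Nat.cast_sub hf1]
          ring
        have hval : ((cs.idxOf d - 1 : Nat) : Int) - ((lv : Int) - 1)
            = ((qmax cs (cs.idxOf d) : Nat) : Int) - (lv : Int) + 1 := by
          push_cast [hqf, Nat.cast_sub hf1]
          ring
        rw [hcutdec, append_mkSizes_cons, hval, hc1]
        have hu' : ((lastIdx cs d : Nat) : Int) = ((qmax cs (fb cs rs') : Nat) : Int) := by
          exact_mod_cast hLq
        rw [hu']
        apply ih (List.pairwise_cons.mp hpw).2 (fun c hc => hmem c (List.mem_cons_of_mem d hc))
        · intro i h hge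
          have hin : cs[i] ∈ d :: rs' := h3 i h (by omega)
          rcases List.mem_cons.mp hin with heq | hin'
          · exfalso
            have : cs.idxOf cs[i] = cs.idxOf d := by rw [heq]
            omega
          · exact hin'
        · omega
        · omega
        · intro i hi1 hi2 hcut
          have h1 := hqstep (i+1) (by omega) (by omega)
          have h2 := hqstep (fb cs rs') hff le_rfl
          omega

lemma qmax_head (cs : List Char) (c : Char) (ct : List Char) (hcs : cs = c :: ct) :
    qmax cs 1 = lastIdx cs c := by
  subst hcs
  simp [qmax]

lemma solve_eq (s : String) : solve s = mkSizes (-1) (cutsFrom s.toList 0) := by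
  by_cases hs : s = ""
  · subst hs
    simp [solve, cutsFrom, mkSizes]
  · have hcs : s.toList ≠ [] := by
      intro hc
      exact hs (by rwa [String.toList_eq_nil_iff] at hc)
    unfold solve
    rw [if_neg hs]
    dsimp only
    rw [show PySem.Str.len s = ((s.toList.length : Nat) : Int) by simp]
    rw [show (PySem.List.pyRange 0 ((s.toList.length : Nat) : Int) 1).foldl (fun d i =>
        let c := PySem.List.pyGetD s.toList i ' '
        if d.get? c ≠ none then
          d.insert c (((d.get? c).getD PySem.Dict.empty).insert "last" i)
        else
          d.insert c (PySem.Dict.ofList [("first", i), ("last", i)])) PySem.Dict.empty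
      = appD s.toList from rfl]
    obtain ⟨hkeys, hvals⟩ := app_char s.toList
    rw [PySem.List.foldl_congr_mem _ _ (stepA s.toList) _ (by
      intro acc k hk
      rw [hkeys] at hk
      have hkcs : k ∈ s.toList := (PySem.Set.mem_ofList _ _).mp hk
      obtain ⟨hf, hl⟩ := hvals k hkcs
      show (if acc.1 = -1 ∧ acc.2.1 = -1 then _ else _) = _
      rw [hf, hl]
      rfl)]
    rw [hkeys]
    obtain ⟨c, ct, hc⟩ := List.exists_cons_of_ne_nil hcs
    have hof : PySem.Set.ofList s.toList = c :: PySem.Set.discard (PySem.Set.ofList ct) c := by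
      rw [hc]; exact PySem.Set.ofList_cons _ _
    rw [hof, List.foldl_cons]
    have hpw0 := pairwise_idxOf s.toList
    rw [hof] at hpw0
    have hidx0 : s.toList.idxOf c = 0 := by rw [hc]; simp
    -- the very first step takes the (l,u) = (-1,-1) branch
    rw [show stepA s.toList (-1, -1, ([] : List Int)) c
        = (((s.toList.idxOf c : Nat) : Int), ((lastIdx s.toList c : Nat) : Int), ([] : List Int)) from by
      unfold stepA; rw [if_pos ⟨rfl, rfl⟩]]
    set cs := s.toList with hcsdef
    set rs := PySem.Set.discard (PySem.Set.ofList ct) c with hrs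
    have hmemrs : ∀ x ∈ rs, x ∈ cs := by
      intro x hx
      have : x ∈ PySem.Set.ofList cs := by rw [hof]; exact List.mem_cons_of_mem c hx
      exact (PySem.Set.mem_ofList _ _).mp this
    have hn : 0 < cs.length := List.length_pos_iff.mpr hcs
    have hfb1 : 1 ≤ fb cs rs := by
      cases hrse : rs with
      | nil => simpa [fb] using hn
      | cons e t =>
          have : cs.idxOf c < cs.idxOf e := by
            apply List.rel_of_pairwise_cons hpw0
            rw [hrse]; exact List.mem_cons_self
          simp only [fb]
          omega
    have hfbn : fb cs rs ≤ cs.length := by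
      cases hrse : rs with
      | nil => simp [fb]
      | cons e t =>
          have : e ∈ cs := hmemrs e (by rw [hrse]; exact List.mem_cons_self)
          simp only [fb]
          exact le_of_lt (List.idxOf_lt_length_iff.mpr this)
    have hminrs : ∀ x ∈ rs, fb cs rs ≤ cs.idxOf x := by
      cases hrse : rs with
      | nil => intro x hx; simp at hx
      | cons e t =>
          intro x hx
          rcases List.mem_cons.mp hx with rfl | hxt
          · simp [fb]
          · simp only [fb]
            have hp' : List.Pairwise (fun a b => cs.idxOf a < cs.idxOf b) (e :: t) := by
              have h2 := (List.pairwise_cons.mp hpw0).2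
              rwa [hrse] at h2
            exact le_of_lt (List.rel_of_pairwise_cons hp' hxt)
    have hwin0 : ∀ i (h : i < cs.length), 0 < i → i < fb cs rs → cs.idxOf cs[i] ≤ 0 := by
      intro i h hi1 hi2
      have hmemi : cs[i] ∈ c :: rs := by
        rw [← hof]
        exact (PySem.Set.mem_ofList _ _).mpr (List.getElem_mem h)
      rcases List.mem_cons.mp hmemi with heq | hin
      · rw [heq, hidx0]
      · exfalso
        have h1 := hminrs cs[i] hin
        have h2 := idxOf_getElem_le cs i h
        omega
    have hqfb : qmax cs (fb cs rs) = lastIdx cs c := by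
      rcases Nat.lt_or_ge 1 (fb cs rs) with h1 | h1
      · rw [qmax_const cs 0 (fb cs rs) hfbn hwin0 (fb cs rs) (by omega) le_rfl]
        exact qmax_head cs c ct hc
      · have : fb cs rs = 1 := by omega
        rw [this]
        exact qmax_head cs c ct hc
    have hmain := Afold cs hcs rs
      (by
        have := (List.pairwise_cons.mp hpw0).2
        exact this)
      hmemrs
      (by
        intro i h hge
        have hmemi : cs[i] ∈ c :: rs := by
          rw [← hof]
          exact (PySem.Set.mem_ofList _ _).mpr (List.getElem_mem h)
        rcases List.mem_cons.mp hmemi with heq | hin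
        · exfalso
          have : cs.idxOf cs[i] = 0 := by rw [heq, hidx0]
          omega
        · exact hin)
      0 []
      (by omega) (by omega)
      (by
        intro i hi1 hi2 hcut
        have hq1 : qmax cs (i+1) = qmax cs 1 := by
          rcases Nat.lt_or_ge 0 i with h1 | h1
          · exact qmax_const cs 0 (fb cs rs) hfbn hwin0 (i+1) (by omega) (by omega)
          · have : i = 0 := by omega
            rw [this]
        have hq2 : qmax cs (fb cs rs) = qmax cs 1 := by
          rw [hqfb, ← qmax_head cs c ct hc]
        omega)
    rw [hidx0, ← hqfb]
    simpa using hmain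

-- ===== VERDICT (by name: the statement is the Claim_ definition above) =====
theorem solve_spec : Claim_equal_solve := by
  intro s _
  unfold Spec_solve
  rw [solve_eq, solve_alt_eq]
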